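-- pv_equiv track=rewrite | github.com/prashandev-19/NyayShayak | backend/app/services/translation_service.py | _merge_translated_chunks
-- ===== SOURCE A (Python) =====
-- from typing import List, Tuple
--
-- def _remove_overlap_repetition(previous_text: str, current_text: str, max_overlap_words: int = 40) -> str:
--     prev_words = previous_text.split()
--     curr_words = current_text.split()
--     if not prev_words or not curr_words:
--         return current_text
--
--     max_k = min(max_overlap_words, len(prev_words), len(curr_words))
--     prev_lower = [w.lower() for w in prev_words]
--     curr_lower = [w.lower() for w in curr_words]
--
--     best_k = 0
--     for k in range(max_k, 4, -1):
--         if prev_lower[-k:] == curr_lower[:k]: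
--             best_k = k
--             break
--
--     if best_k > 0:
--         return " ".join(curr_words[best_k:]).strip()
--     return current_text
--
-- def _merge_translated_chunks(parts: List[str]) -> str:
--     if not parts:
--         return ""
--     merged = parts[0].strip()
--     for part in parts[1:]:
--         clean_part = _remove_overlap_repetition(merged, part.strip())
--         if clean_part:
--             merged = (merged + " " + clean_part).strip()
--     return merged
-- ===== SOURCE B (Python) =====
-- from typing import List
--
-- def _merge_translated_chunks(parts: List[str]) -> str:
--     if not parts:
--         return ""
--     merged = parts[0].strip()
--     tail = [w.lower() for w in merged.split()][-40:]
--     for part in parts[1:]: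
--         stripped = part.strip()
--         words = stripped.split()
--         low = [w.lower() for w in words]
--         k = 0
--         for j in range(min(40, len(tail), len(words)), 4, -1):
--             if tail[-j:] == low[:j]:
--                 k = j
--                 break
--         piece = " ".join(words[k:]) if k else stripped
--         if piece:
--             merged = piece if not merged else merged + " " + piece
--             tail = (tail + low[k:])[-40:]
--     return merged
-- ===== Notes on version B (the rewrite author's own statement) =====
-- stated objective: faster
-- what changed: B keeps the merged text and only the trailing <=40 lowercased words as incrementally maintained state, so each chunk is processed against that bounded tail instead of re-splitting and re-lowercasing the entire merged string on every iteration as A does.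
import Mathlib
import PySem

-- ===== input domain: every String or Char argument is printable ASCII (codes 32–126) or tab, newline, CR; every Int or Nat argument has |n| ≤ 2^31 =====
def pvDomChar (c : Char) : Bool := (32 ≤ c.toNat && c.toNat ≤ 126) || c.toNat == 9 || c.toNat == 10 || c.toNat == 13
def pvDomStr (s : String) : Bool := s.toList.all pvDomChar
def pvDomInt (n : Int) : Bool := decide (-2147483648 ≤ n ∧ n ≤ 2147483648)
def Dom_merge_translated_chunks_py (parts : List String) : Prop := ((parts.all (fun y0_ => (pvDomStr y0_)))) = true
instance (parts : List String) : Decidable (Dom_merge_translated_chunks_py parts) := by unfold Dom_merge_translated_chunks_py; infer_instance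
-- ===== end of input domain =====

-- B rebuilds the merged text incrementally, keeping only the trailing ≤40 lowercased words for the
-- overlap test instead of re-splitting the whole merged string on every chunk (objective: faster).

-- shared helper: the 'for k in range(...): if cond: best = k; break' loop both sources contain
def pvFindBreak (cond : Int → Bool) : List Int → Int
  | [] => 0
  | k :: ks => if cond k then k else pvFindBreak cond ks

-- ===== PORT A =====
def pvRemoveOverlapRep (previous_text current_text : String) (max_overlap_words : Int) : String :=
  let prev_words := PySem.Str.split₀ previous_text
  let curr_words := PySem.Str.split₀ current_text
  if prev_words = [] ∨ curr_words = [] then current_text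
  else
    let max_k : Int := min max_overlap_words (min (prev_words.length : Int) (curr_words.length : Int))
    let prev_lower := prev_words.map PySem.Str.lower
    let curr_lower := curr_words.map PySem.Str.lower
    let best_k : Int := pvFindBreak
      (fun k => decide (PySem.List.slice prev_lower (some (-k)) none = PySem.List.slice curr_lower none (some k)))
      (PySem.List.pyRange max_k 4 (-1))
    if best_k > 0 then PySem.Str.strip (PySem.Str.join " " (PySem.List.slice curr_words (some best_k) none))
    else current_text

def pvLoopA (merged part : String) : String :=
  let clean_part := pvRemoveOverlapRep merged (PySem.Str.strip part) 40
  if clean_part ≠ "" then PySem.Str.strip (merged ++ " " ++ clean_part) else merged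

def merge_translated_chunks_py (parts : List String) : String :=
  match parts with
  | [] => ""
  | p0 :: rest => rest.foldl pvLoopA (PySem.Str.strip p0)

-- ===== PORT B =====
def pvLoopB (st : String × List String) (part : String) : String × List String :=
  let stripped := PySem.Str.strip part
  let words := PySem.Str.split₀ stripped
  let low := words.map PySem.Str.lower
  let k : Int := pvFindBreak
    (fun j => decide (PySem.List.slice st.2 (some (-j)) none = PySem.List.slice low none (some j)))
    (PySem.List.pyRange (min 40 (min (st.2.length : Int) (words.length : Int))) 4 (-1))
  let piece := if k ≠ 0 then PySem.Str.join " " (PySem.List.slice words (some k) none) else stripped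
  if piece ≠ "" then
    (if st.1 = "" then piece else st.1 ++ " " ++ piece,
     PySem.List.slice (st.2 ++ PySem.List.slice low (some k) none) (some (-40)) none)
  else st

def merge_translated_chunks_py_alt (parts : List String) : String :=
  match parts with
  | [] => ""
  | p0 :: rest =>
    let merged := PySem.Str.strip p0
    let tail := PySem.List.slice ((PySem.Str.split₀ merged).map PySem.Str.lower) (some (-40)) none
    (rest.foldl pvLoopB (merged, tail)).1

-- ===== PRECONDITION & SPEC =====
def Spec_merge_translated_chunks_py (parts : List String) (out : String) : Prop := out = merge_translated_chunks_py_alt parts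
instance (parts : List String) (out : String) : Decidable (Spec_merge_translated_chunks_py parts out) := by unfold Spec_merge_translated_chunks_py; infer_instance

-- ===== CLAIM (what is proved, stated in full; the proofs are below) =====
def Claim_equal_merge_translated_chunks_py : Prop := ∀ (parts : List String), Dom_merge_translated_chunks_py parts → Spec_merge_translated_chunks_py parts (merge_translated_chunks_py parts)

-- ===== LEMMAS AND PROOFS =====

theorem pv_go_acc (s : List Char) : ∀ (cur : List Char) (acc : List (List Char)),
    PySem.Chars.split₀.go s cur acc = acc.reverse ++ PySem.Chars.split₀.go s cur [] := by
  induction s with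
  | nil => intro cur acc; simp [PySem.Chars.split₀.go]; split <;> simp
  | cons c rest ih =>
    intro cur acc
    simp only [PySem.Chars.split₀.go]
    split
    · split
      · rw [ih [] acc]
      · rw [ih [] (cur.reverse :: acc), ih [] [cur.reverse]]; simp
    · rw [ih (c :: cur) acc, ih (c :: cur) []]

theorem pv_go_word (w : List Char) (hw : ∀ c ∈ w, PySem.Chars.isspace c = false) :
    ∀ (rest cur : List Char) (acc : List (List Char)),
    PySem.Chars.split₀.go (w ++ rest) cur acc = PySem.Chars.split₀.go rest (w.reverse ++ cur) acc := by
  induction w with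
  | nil => intro rest cur acc; simp
  | cons c t ih =>
    intro rest cur acc
    have hc : PySem.Chars.isspace c = false := hw c (by simp)
    simp only [List.cons_append, PySem.Chars.split₀.go, hc]
    rw [ih (fun x hx => hw x (by simp [hx])) rest (c :: cur) acc]
    simp

theorem pv_go_space (b : List Char) : ∀ (a cur : List Char) (acc : List (List Char)),
    PySem.Chars.split₀.go (a ++ ' ' :: b) cur acc =
      PySem.Chars.split₀.go a cur acc ++ PySem.Chars.split₀.go b [] [] := by
  intro a
  induction a with
  | nil =>
    intro cur acc
    have hsp : PySem.Chars.isspace ' ' = true := by decide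
    simp only [List.nil_append, PySem.Chars.split₀.go, hsp, if_true]
    by_cases hcur : cur.isEmpty = true
    · simp only [hcur, if_true]
      exact pv_go_acc b [] acc
    · simp only [hcur, if_false]
      rw [pv_go_acc b [] (cur.reverse :: acc)]
      simp
  | cons c t ih =>
    intro cur acc
    simp only [List.cons_append, PySem.Chars.split₀.go]
    split
    · split <;> rw [ih]
    · rw [ih]

theorem pv_go_all_space (s : List Char) (hs : ∀ c ∈ s, PySem.Chars.isspace c = true) :
    ∀ acc, PySem.Chars.split₀.go s [] acc = acc.reverse := by
  induction s with
  | nil => intro acc; simp [PySem.Chars.split₀.go]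
  | cons c t ih =>
    intro acc
    simp only [PySem.Chars.split₀.go, hs c (by simp)]
    exact ih (fun x hx => hs x (by simp [hx])) acc

theorem pv_go_eq_nil (s : List Char) : ∀ (cur : List Char) (acc : List (List Char)),
    PySem.Chars.split₀.go s cur acc = [] →
    acc = [] ∧ cur = [] ∧ ∀ c ∈ s, PySem.Chars.isspace c = true := by
  induction s with
  | nil =>
    intro cur acc h
    simp only [PySem.Chars.split₀.go] at h
    split at h
    · simp_all
    · simp at h
  | cons c t ih =>
    intro cur acc h
    simp only [PySem.Chars.split₀.go] at h
    split at h
    · split at h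
      · rcases ih _ _ h with ⟨h1, _, h3⟩
        refine ⟨h1, by simp_all, ?_⟩
        intro x hx
        rcases List.mem_cons.mp hx with hx | hx
        · simp_all
        · exact h3 x hx
      · rcases ih _ _ h with ⟨h1, _, _⟩; simp at h1
    · rcases ih _ _ h with ⟨_, h2, _⟩; simp at h2

theorem pv_split₀_eq_nil_iff (s : List Char) :
    PySem.Chars.split₀ s = [] ↔ ∀ c ∈ s, PySem.Chars.isspace c = true := by
  constructor
  · intro h; exact (pv_go_eq_nil s [] [] h).2.2
  · intro h
    show PySem.Chars.split₀.go s [] [] = []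
    rw [pv_go_all_space s h]; simp

theorem pv_go_words (s : List Char) : ∀ (cur : List Char) (acc : List (List Char)),
    (∀ w ∈ acc, w ≠ [] ∧ ∀ c ∈ w, PySem.Chars.isspace c = false) →
    (∀ c ∈ cur, PySem.Chars.isspace c = false) →
    ∀ w ∈ PySem.Chars.split₀.go s cur acc, w ≠ [] ∧ ∀ c ∈ w, PySem.Chars.isspace c = false := by
  induction s with
  | nil =>
    intro cur acc hacc hcur
    simp only [PySem.Chars.split₀.go]
    split
    · intro w hw; simp at hw; exact hacc w hw
    · intro w hw
      simp at hw
      rcases hw with hw | hw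
      · exact hacc w hw
      · subst hw
        constructor
        · simp_all
        · intro c hc; exact hcur c (by simpa using hc)
  | cons c t ih =>
    intro cur acc hacc hcur
    simp only [PySem.Chars.split₀.go]
    split
    · split
      · exact ih [] acc hacc (by simp)
      · refine ih [] (cur.reverse :: acc) ?_ (by simp)
        intro w hw
        rcases List.mem_cons.mp hw with hw | hw
        · subst hw
          exact ⟨by simp_all, fun x hx => hcur x (by simpa using hx)⟩
        · exact hacc w hw
    · refine ih (c :: cur) acc hacc ?_
      intro x hx
      rcases List.mem_cons.mp hx with hx | hx
      · simp_all
      · exact hcur x hx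

theorem pv_split₀_words (s : List Char) :
    ∀ w ∈ PySem.Chars.split₀ s, w ≠ [] ∧ ∀ c ∈ w, PySem.Chars.isspace c = false :=
  pv_go_words s [] [] (by simp) (by simp)

theorem pv_split₀_single (s : List Char) (h0 : s ≠ [])
    (h : ∀ c ∈ s, PySem.Chars.isspace c = false) : PySem.Chars.split₀ s = [s] := by
  show PySem.Chars.split₀.go s [] [] = [s]
  have := pv_go_word s h [] [] []
  simp at this
  rw [this]
  simp [PySem.Chars.split₀.go, h0]

theorem pv_split₀_append_space (a b : List Char) :
    PySem.Chars.split₀ (a ++ ' ' :: b) = PySem.Chars.split₀ a ++ PySem.Chars.split₀ b :=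
  pv_go_space b a [] []

theorem pv_split₀_join (ws : List (List Char))
    (h : ∀ w ∈ ws, w ≠ [] ∧ ∀ c ∈ w, PySem.Chars.isspace c = false) :
    PySem.Chars.split₀ (List.intercalate [' '] ws) = ws := by
  induction ws with
  | nil => simp [List.intercalate]; rfl
  | cons w ws ih =>
    match ws with
    | [] =>
      simp [List.intercalate]
      exact pv_split₀_single w (h w (by simp)).1 (h w (by simp)).2
    | v :: vs =>
      have hi : List.intercalate [' '] (w :: v :: vs) = w ++ ' ' :: List.intercalate [' '] (v :: vs) := by
        simp [List.intercalate, List.intersperse]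
      rw [hi, pv_split₀_append_space,
        pv_split₀_single w (h w (by simp)).1 (h w (by simp)).2,
        ih (fun x hx => h x (by simp [hx]))]
      simp

-- strip facts
theorem pv_lstrip_of_head (c : Char) (t : List Char) (hc : PySem.Chars.isspace c = false) :
    PySem.Chars.lstrip (c :: t) = c :: t := by
  simp [PySem.Chars.lstrip, hc]

theorem pv_lstrip_fix_of_strip_fix (s : List Char) (h : PySem.Chars.strip s = s) :
    PySem.Chars.lstrip s = s := by
  have h1 : PySem.Chars.lstrip s <:+ s := List.dropWhile_suffix _
  have h2 : (PySem.Chars.rstrip (PySem.Chars.lstrip s)).length ≤ (PySem.Chars.lstrip s).length := by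
    simpa [PySem.Chars.rstrip] using
      (List.dropWhile_suffix (l := (PySem.Chars.lstrip s).reverse) PySem.Chars.isspace).length_le
  have h3 : (PySem.Chars.rstrip (PySem.Chars.lstrip s)).length = s.length := congrArg List.length h
  have h4 := h1.length_le
  exact h1.eq_of_length (by omega)

theorem pv_rstrip_fix_of_strip_fix (s : List Char) (h : PySem.Chars.strip s = s) :
    PySem.Chars.rstrip s = s := by
  have hl := pv_lstrip_fix_of_strip_fix s h
  rw [PySem.Chars.strip, hl] at h
  exact h

theorem pv_head_nonspace (c : Char) (t : List Char) (h : PySem.Chars.lstrip (c :: t) = c :: t) :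
    PySem.Chars.isspace c = false := by
  by_contra hc
  simp at hc
  simp [PySem.Chars.lstrip, hc] at h
  have := (List.dropWhile_suffix (l := t) PySem.Chars.isspace).length_le
  rw [h] at this
  simp at this

theorem pv_rstrip_prefix (t : List Char) : PySem.Chars.rstrip t <+: t := by
  have h : List.dropWhile PySem.Chars.isspace t.reverse <:+ t.reverse := List.dropWhile_suffix _
  have := List.reverse_prefix.mpr h
  simpa [PySem.Chars.rstrip] using this

theorem pv_strip_nil_iff (s : List Char) :
    PySem.Chars.strip s = [] ↔ ∀ c ∈ s, PySem.Chars.isspace c = true := by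
  constructor
  · intro h c hc
    have hrev : List.dropWhile PySem.Chars.isspace (PySem.Chars.lstrip s).reverse = [] := by
      have : (List.dropWhile PySem.Chars.isspace (PySem.Chars.lstrip s).reverse).reverse = [] := h
      simpa using this
    have hall : ∀ x ∈ (PySem.Chars.lstrip s).reverse, PySem.Chars.isspace x = true :=
      List.dropWhile_eq_nil_iff.mp hrev
    have hall2 : ∀ x ∈ PySem.Chars.lstrip s, PySem.Chars.isspace x = true := by
      intro x hx; exact hall x (by simpa using hx)
    have hsplit : List.takeWhile PySem.Chars.isspace s ++ PySem.Chars.lstrip s = s :=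
      List.takeWhile_append_dropWhile
    rw [← hsplit] at hc
    rcases List.mem_append.mp hc with hc | hc
    · exact List.mem_takeWhile_imp hc
    · exact hall2 c hc
  · intro h
    have hl : PySem.Chars.lstrip s = [] := List.dropWhile_eq_nil_iff.mpr h
    rw [PySem.Chars.strip, hl]
    rfl

theorem pv_strip_fix_nil (s : List Char) (hfix : PySem.Chars.strip s = s)
    (hsp : ∀ c ∈ s, PySem.Chars.isspace c = true) : s = [] := by
  rw [← hfix]
  exact (pv_strip_nil_iff s).mpr hsp

theorem pv_lstrip_idem (s : List Char) :
    PySem.Chars.lstrip (PySem.Chars.lstrip s) = PySem.Chars.lstrip s :=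
  List.dropWhile_idempotent _ _

theorem pv_rstrip_idem (s : List Char) :
    PySem.Chars.rstrip (PySem.Chars.rstrip s) = PySem.Chars.rstrip s := by
  simp [PySem.Chars.rstrip, List.dropWhile_idempotent]

theorem pv_lstrip_rstrip (t : List Char) (h : PySem.Chars.lstrip t = t) :
    PySem.Chars.lstrip (PySem.Chars.rstrip t) = PySem.Chars.rstrip t := by
  match ht : PySem.Chars.rstrip t with
  | [] => rfl
  | d :: v =>
    have hpre : PySem.Chars.rstrip t <+: t := pv_rstrip_prefix t
    rw [ht] at hpre
    match t, hpre with
    | _, ⟨r, rfl⟩ =>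
      have hd : PySem.Chars.isspace d = false := pv_head_nonspace d (v ++ r) (by simpa using h)
      exact pv_lstrip_of_head d v hd

theorem pv_strip_idem (s : List Char) :
    PySem.Chars.strip (PySem.Chars.strip s) = PySem.Chars.strip s := by
  show PySem.Chars.rstrip (PySem.Chars.lstrip (PySem.Chars.rstrip (PySem.Chars.lstrip s))) = _
  rw [pv_lstrip_rstrip _ (pv_lstrip_idem s), pv_rstrip_idem]
  rfl

theorem pv_last_nonspace (c : List Char) (hc0 : c ≠ []) (h : PySem.Chars.rstrip c = c) :
    ∃ d v, c.reverse = d :: v ∧ PySem.Chars.isspace d = false := by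
  have hrev : List.dropWhile PySem.Chars.isspace c.reverse = c.reverse := by
    have := congrArg List.reverse h
    simpa [PySem.Chars.rstrip] using this
  match hc : c.reverse with
  | [] => exact absurd (by simpa using hc) hc0
  | d :: v =>
    rw [hc] at hrev
    exact ⟨d, v, rfl, pv_head_nonspace d v hrev⟩

theorem pv_strip_concat (m c : List Char) (hm : PySem.Chars.strip m = m) (hm0 : m ≠ [])
    (hc : PySem.Chars.strip c = c) (hc0 : c ≠ []) :
    PySem.Chars.strip (m ++ ' ' :: c) = m ++ ' ' :: c := by
  obtain ⟨mh, mt, rfl⟩ : ∃ mh mt, m = mh :: mt := by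
    cases m with
    | nil => exact absurd rfl hm0
    | cons x xs => exact ⟨x, xs, rfl⟩
  have hmh : PySem.Chars.isspace mh = false :=
    pv_head_nonspace mh mt (pv_lstrip_fix_of_strip_fix _ hm)
  obtain ⟨d, v, hdv, hd⟩ := pv_last_nonspace c hc0 (pv_rstrip_fix_of_strip_fix c hc)
  show PySem.Chars.rstrip (PySem.Chars.lstrip _) = _
  rw [show (mh :: mt) ++ ' ' :: c = mh :: (mt ++ ' ' :: c) from rfl,
      pv_lstrip_of_head mh (mt ++ ' ' :: c) hmh]
  have hrev : (mh :: (mt ++ ' ' :: c)).reverse = d :: (v ++ ' ' :: (mt.reverse ++ [mh])) := by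
    simp [hdv]
  rw [PySem.Chars.rstrip, hrev]
  rw [List.dropWhile_cons_of_neg (by simp [hd])]
  rw [← hrev]
  simp

theorem pv_strip_space_cons (c : List Char) (hc : PySem.Chars.strip c = c) :
    PySem.Chars.strip (' ' :: c) = c := by
  show PySem.Chars.rstrip (PySem.Chars.lstrip _) = _
  rw [show PySem.Chars.lstrip (' ' :: c) = PySem.Chars.lstrip c by
        unfold PySem.Chars.lstrip
        exact List.dropWhile_cons_of_pos (by decide)]
  rw [pv_lstrip_fix_of_strip_fix c hc]
  exact pv_rstrip_fix_of_strip_fix c hc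

-- Str-level glue
theorem pv_toList_inj (s t : String) (h : s.toList = t.toList) : s = t := by
  exact String.ext_iff.mpr h

theorem pv_mapToList_inj (xs ys : List String) (h : xs.map String.toList = ys.map String.toList) :
    xs = ys := by
  exact List.map_injective_iff.mpr (fun a b hab => pv_toList_inj a b hab) h

theorem pv_sp_toList (s : String) : (PySem.Str.strip s).toList = PySem.Chars.strip s.toList :=
  PySem.Str.toList_strip s

theorem pv_strip_str_fix (s : String) (h : PySem.Chars.strip s.toList = s.toList) :
    PySem.Str.strip s = s :=
  pv_toList_inj _ _ (by rw [pv_sp_toList, h])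

theorem pv_str_strip_idem (s : String) :
    PySem.Str.strip (PySem.Str.strip s) = PySem.Str.strip s :=
  pv_strip_str_fix _ (by rw [pv_sp_toList]; exact pv_strip_idem _)

theorem pv_split₀_toList (s : String) :
    (PySem.Str.split₀ s).map String.toList = PySem.Chars.split₀ s.toList :=
  PySem.Str.split₀_map_toList s

theorem pv_split₀_nil_iff (s : String) :
    PySem.Str.split₀ s = [] ↔ PySem.Chars.split₀ s.toList = [] := by
  rw [← pv_split₀_toList]
  exact (List.map_eq_nil_iff).symm

theorem pv_concat_toList (m c : String) :
    (m ++ " " ++ c).toList = m.toList ++ ' ' :: c.toList := by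
  simp [String.toList_append]

theorem pv_join_toList (ws : List String) :
    (PySem.Str.join " " ws).toList = List.intercalate [' '] (ws.map String.toList) := by
  rw [PySem.Str.toList_join]
  rfl

theorem pv_empty_toList_iff (s : String) : s = "" ↔ s.toList = [] := by
  constructor
  · intro h; rw [h]; rfl
  · intro h; exact pv_toList_inj _ _ (by rw [h]; rfl)

theorem pv_strip_word (s : List Char) (h0 : s ≠ [])
    (h : ∀ c ∈ s, PySem.Chars.isspace c = false) : PySem.Chars.strip s = s := by
  obtain ⟨c, t, rfl⟩ : ∃ c t, s = c :: t := by
    cases s with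
    | nil => exact absurd rfl h0
    | cons x xs => exact ⟨x, xs, rfl⟩
  show PySem.Chars.rstrip (PySem.Chars.lstrip _) = _
  rw [pv_lstrip_of_head c t (h c (by simp))]
  obtain ⟨d, v, hdv⟩ : ∃ d v, (c :: t).reverse = d :: v := by
    match hrv : (c :: t).reverse with
    | [] => exact absurd (congrArg List.length hrv) (by simp)
    | d :: v => exact ⟨d, v, rfl⟩
  have hd : PySem.Chars.isspace d = false := by
    apply h
    have hmem : d ∈ (c :: t).reverse := by rw [hdv]; simp
    exact List.mem_reverse.mp hmem
  rw [PySem.Chars.rstrip, hdv, List.dropWhile_cons_of_neg (by simp [hd]), ← hdv]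
  simp

theorem pv_join_ne_nil (ws : List (List Char)) (h0 : ws ≠ [])
    (h : ∀ w ∈ ws, w ≠ [] ∧ ∀ c ∈ w, PySem.Chars.isspace c = false) :
    List.intercalate [' '] ws ≠ [] := by
  intro hnil
  have := pv_split₀_join ws h
  rw [hnil] at this
  exact h0 (by rw [← this]; rfl)

theorem pv_strip_join (ws : List (List Char)) (h0 : ws ≠ [])
    (h : ∀ w ∈ ws, w ≠ [] ∧ ∀ c ∈ w, PySem.Chars.isspace c = false) :
    PySem.Chars.strip (List.intercalate [' '] ws) = List.intercalate [' '] ws := by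
  induction ws with
  | nil => exact absurd rfl h0
  | cons w ws ih =>
    match ws with
    | [] =>
      simp only [List.intercalate, List.intersperse, List.flatten]
      simp
      exact pv_strip_word w (h w (by simp)).1 (h w (by simp)).2
    | v :: vs =>
      have hi : List.intercalate [' '] (w :: v :: vs) = w ++ ' ' :: List.intercalate [' '] (v :: vs) := by
        simp [List.intercalate, List.intersperse]
      rw [hi]
      exact pv_strip_concat w (List.intercalate [' '] (v :: vs))
        (pv_strip_word w (h w (by simp)).1 (h w (by simp)).2) (h w (by simp)).1
        (ih (by simp) (fun x hx => h x (by simp [hx])))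
        (pv_join_ne_nil (v :: vs) (by simp) (fun x hx => h x (by simp [hx])))

-- findBreak lemmas
theorem pvFindBreak_congr (c1 c2 : Int → Bool) (l : List Int) (h : ∀ k ∈ l, c1 k = c2 k) :
    pvFindBreak c1 l = pvFindBreak c2 l := by
  induction l with
  | nil => rfl
  | cons k ks ih =>
    simp only [pvFindBreak, h k (by simp)]
    split
    · rfl
    · exact ih (fun x hx => h x (by simp [hx]))

theorem pvFindBreak_cases (c : Int → Bool) (l : List Int) :
    pvFindBreak c l = 0 ∨ (pvFindBreak c l ∈ l ∧ c (pvFindBreak c l) = true) := by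
  induction l with
  | nil => left; rfl
  | cons k ks ih =>
    simp only [pvFindBreak]
    split
    · right; exact ⟨by simp, by assumption⟩
    · rcases ih with h | ⟨h1, h2⟩
      · left; exact h
      · right; exact ⟨by simp [h1], h2⟩

-- the loop invariant
def pvLastN (xs : List String) : List String := xs.drop (xs.length - 40)

def pvInv (m : String) (tl : List String) : Prop :=
  PySem.Str.strip m = m ∧ tl = pvLastN ((PySem.Str.split₀ m).map PySem.Str.lower)

theorem pv_slice40 (xs : List String) :
    PySem.List.slice xs (some (-40)) none = pvLastN xs :=
  PySem.List.slice_from_neg_ofNat xs 40 (by omega)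

theorem pv_lastN_append (xs ys : List String) :
    pvLastN (pvLastN xs ++ ys) = pvLastN (xs ++ ys) := by
  unfold pvLastN
  rw [List.drop_append, List.drop_append, List.drop_drop]
  simp only [List.length_append, List.length_drop]
  have e1 : xs.length - 40 + (xs.length - (xs.length - 40) + ys.length - 40) =
      xs.length + ys.length - 40 := by omega
  have e2 : xs.length - (xs.length - 40) + ys.length - 40 - (xs.length - (xs.length - 40)) =
      xs.length + ys.length - 40 - xs.length := by omega
  rw [e1, e2]

theorem pv_split₀_empty : PySem.Str.split₀ "" = [] := by
  exact (pv_split₀_nil_iff "").mpr rfl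

theorem pv_step (m : String) (tl : List String) (part : String) (hInv : pvInv m tl) :
    pvLoopA m part = (pvLoopB (m, tl) part).1 ∧
      pvInv (pvLoopA m part) (pvLoopB (m, tl) part).2 := by
  obtain ⟨hm, htl⟩ := hInv
  have hstripfix : PySem.Chars.strip (PySem.Str.strip part).toList = (PySem.Str.strip part).toList := by
    rw [pv_sp_toList]; exact pv_strip_idem _
  have hmfix : PySem.Chars.strip m.toList = m.toList := by
    have := congrArg String.toList hm
    rw [pv_sp_toList] at this
    exact this
  by_cases hw : PySem.Str.split₀ (PySem.Str.strip part) = []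
  · -- the chunk has no words: it strips to "" and both sides leave the state unchanged
    have hstr0 : PySem.Str.strip part = "" := by
      apply (pv_empty_toList_iff _).mpr
      exact pv_strip_fix_nil _ hstripfix ((pv_split₀_eq_nil_iff _).mp ((pv_split₀_nil_iff _).mp hw))
    have ea : pvLoopA m part = m := by
      simp only [pvLoopA, pvRemoveOverlapRep, hstr0]
      simp [pv_split₀_empty]
    have eb : pvLoopB (m, tl) part = (m, tl) := by
      simp only [pvLoopB, hw]
      simp only [List.map_nil, List.length_nil, Nat.cast_zero]
      rw [show min (40:Int) (min (tl.length:Int) 0) = 0 from by omega]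
      rw [show PySem.List.pyRange 0 4 (-1) = [] from by decide]
      simp [pvFindBreak, hstr0]
    refine ⟨by simp [ea, eb], ?_⟩
    rw [ea, eb]
    exact ⟨hm, by simp [htl]⟩
  · by_cases hm0 : m = ""
    · -- merged still empty: the stripped chunk is adopted wholesale on both sides
      have hprev0 : PySem.Str.split₀ m = [] := by rw [hm0]; exact pv_split₀_empty
      have htl0 : tl = [] := by rw [htl, hprev0]; rfl
      have hstrne : PySem.Str.strip part ≠ "" := by
        intro hc
        exact hw (by rw [hc]; exact pv_split₀_empty)
      have hcat : PySem.Str.strip ("" ++ " " ++ PySem.Str.strip part) = PySem.Str.strip part := by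
        apply pv_toList_inj
        rw [pv_sp_toList, pv_concat_toList]
        rw [show ("" : String).toList = [] from rfl, List.nil_append]
        exact pv_strip_space_cons _ hstripfix
      have ea : pvLoopA m part = PySem.Str.strip part := by
        simp only [pvLoopA, pvRemoveOverlapRep, hprev0]
        simp only [eq_self_iff_true, true_or, if_true]
        rw [if_pos hstrne, hm0]
        exact hcat
      have eb : pvLoopB (m, tl) part =
          (PySem.Str.strip part, pvLastN ((PySem.Str.split₀ (PySem.Str.strip part)).map PySem.Str.lower)) := by
        simp only [pvLoopB, htl0, hm0]
        simp only [List.length_nil, Nat.cast_zero]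
        rw [show min (40:Int) (min (0:Int) (((PySem.Str.split₀ (PySem.Str.strip part)).length : Int))) = 0 from by
          have : (0:Int) ≤ ((PySem.Str.split₀ (PySem.Str.strip part)).length : Int) := by positivity
          omega]
        rw [show PySem.List.pyRange 0 4 (-1) = [] from by decide]
        simp only [pvFindBreak]
        rw [if_neg (by omega : ¬ (0:Int) ≠ 0)]
        rw [if_pos hstrne]
        simp only [if_true]
        simp only [PySem.List.slice_zero_start, PySem.List.slice_none_none, List.nil_append]
        rw [PySem.List.slice_from_neg_ofNat _ 40 (by omega)]
        rfl
      refine ⟨by simp [ea, eb], ?_⟩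
      rw [ea, eb]
      exact ⟨pv_str_strip_idem part, by simp⟩
    · -- main case: both the merged text and the chunk have words
      have hmtl : m.toList ≠ [] := fun hc => hm0 ((pv_empty_toList_iff m).mpr hc)
      have hprevne : PySem.Str.split₀ m ≠ [] := by
        intro hc
        exact hm0 ((pv_empty_toList_iff m).mpr
          (pv_strip_fix_nil _ hmfix ((pv_split₀_eq_nil_iff _).mp ((pv_split₀_nil_iff _).mp hc))))
      have hstrne : PySem.Str.strip part ≠ "" := by
        intro hc
        exact hw (by rw [hc]; exact pv_split₀_empty)
      have hstrtl : (PySem.Str.strip part).toList ≠ [] := fun hc => hstrne ((pv_empty_toList_iff _).mpr hc)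
      have hplen : (List.map PySem.Str.lower (PySem.Str.split₀ m)).length = (PySem.Str.split₀ m).length := by
        simp
      have htllen : tl.length =
          (List.map PySem.Str.lower (PySem.Str.split₀ m)).length -
            ((List.map PySem.Str.lower (PySem.Str.split₀ m)).length - 40) := by
        rw [htl]; simp [pvLastN]
      have hminEq : min 40 (min (tl.length : Int) ((PySem.Str.split₀ (PySem.Str.strip part)).length : Int))
          = min 40 (min ((PySem.Str.split₀ m).length : Int) ((PySem.Str.split₀ (PySem.Str.strip part)).length : Int)) := by
        omega
      have hcond : ∀ j ∈ PySem.List.pyRange (min 40 (min ((PySem.Str.split₀ m).length : Int) ((PySem.Str.split₀ (PySem.Str.strip part)).length : Int))) 4 (-1),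
          decide (PySem.List.slice tl (some (-j)) none = PySem.List.slice (List.map PySem.Str.lower (PySem.Str.split₀ (PySem.Str.strip part))) none (some j))
          = decide (PySem.List.slice (List.map PySem.Str.lower (PySem.Str.split₀ m)) (some (-j)) none = PySem.List.slice (List.map PySem.Str.lower (PySem.Str.split₀ (PySem.Str.strip part))) none (some j)) := by
        intro j hj
        obtain ⟨hj4, hjle⟩ := PySem.List.mem_pyRange_neg_one.mp hj
        have hjn : j = ((j.toNat : Nat) : Int) := by omega
        have hsl : PySem.List.slice tl (some (-j)) none =
            PySem.List.slice (List.map PySem.Str.lower (PySem.Str.split₀ m)) (some (-j)) none := by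
          rw [htl]
          unfold pvLastN
          rw [hjn, PySem.List.slice_from_neg_natCast _ j.toNat (by omega),
              PySem.List.slice_from_neg_natCast (List.map PySem.Str.lower (PySem.Str.split₀ m)) j.toNat (by omega)]
          rw [List.drop_drop, List.length_drop]
          rw [show (List.map PySem.Str.lower (PySem.Str.split₀ m)).length - 40 + ((List.map PySem.Str.lower (PySem.Str.split₀ m)).length - ((List.map PySem.Str.lower (PySem.Str.split₀ m)).length - 40) - j.toNat) = (List.map PySem.Str.lower (PySem.Str.split₀ m)).length - j.toNat from by omega]
        rw [hsl]
      have hkeq : pvFindBreak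
            (fun j => decide (PySem.List.slice tl (some (-j)) none = PySem.List.slice (List.map PySem.Str.lower (PySem.Str.split₀ (PySem.Str.strip part))) none (some j)))
            (PySem.List.pyRange (min 40 (min (tl.length : Int) ((PySem.Str.split₀ (PySem.Str.strip part)).length : Int))) 4 (-1))
          = pvFindBreak
            (fun j => decide (PySem.List.slice (List.map PySem.Str.lower (PySem.Str.split₀ m)) (some (-j)) none = PySem.List.slice (List.map PySem.Str.lower (PySem.Str.split₀ (PySem.Str.strip part))) none (some j)))
            (PySem.List.pyRange (min 40 (min ((PySem.Str.split₀ m).length : Int) ((PySem.Str.split₀ (PySem.Str.strip part)).length : Int))) 4 (-1)) := by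
        rw [hminEq]
        exact pvFindBreak_congr _ _ _ hcond
      obtain ⟨kv, hkv⟩ : ∃ kv, (pvFindBreak (fun j => decide (PySem.List.slice (List.map PySem.Str.lower (PySem.Str.split₀ m)) (some (-j)) none = PySem.List.slice (List.map PySem.Str.lower (PySem.Str.split₀ (PySem.Str.strip part))) none (some j))) (PySem.List.pyRange (min 40 (min ((PySem.Str.split₀ m).length : Int) ((PySem.Str.split₀ (PySem.Str.strip part)).length : Int))) 4 (-1))) = kv := ⟨_, rfl⟩
      rw [hkv] at hkeq
      have hkcases := pvFindBreak_cases
          (fun j => decide (PySem.List.slice (List.map PySem.Str.lower (PySem.Str.split₀ m)) (some (-j)) none = PySem.List.slice (List.map PySem.Str.lower (PySem.Str.split₀ (PySem.Str.strip part))) none (some j)))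
          (PySem.List.pyRange (min 40 (min ((PySem.Str.split₀ m).length : Int) ((PySem.Str.split₀ (PySem.Str.strip part)).length : Int))) 4 (-1))
      rw [hkv] at hkcases
      rcases hkcases with hk0 | ⟨hkmem, hktrue⟩
      · -- no overlap found: the stripped chunk is appended verbatim
        have hcat : PySem.Str.strip (m ++ " " ++ PySem.Str.strip part) = m ++ " " ++ PySem.Str.strip part := by
          apply pv_toList_inj
          rw [pv_sp_toList, pv_concat_toList]
          exact pv_strip_concat _ _ hmfix hmtl hstripfix hstrtl
        have ea : pvLoopA m part = m ++ " " ++ PySem.Str.strip part := by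
          simp only [pvLoopA, pvRemoveOverlapRep]
          rw [if_neg (not_or.mpr ⟨hprevne, hw⟩), hkv, hk0]
          rw [if_neg (by omega : ¬ (0:Int) > 0)]
          rw [if_pos hstrne]
          exact hcat
        have eb : pvLoopB (m, tl) part = (m ++ " " ++ PySem.Str.strip part,
            pvLastN (tl ++ List.map PySem.Str.lower (PySem.Str.split₀ (PySem.Str.strip part)))) := by
          simp only [pvLoopB]
          rw [hkeq, hk0]
          rw [if_neg (by omega : ¬ (0:Int) ≠ 0)]
          rw [if_pos hstrne, if_neg hm0]
          simp only [PySem.List.slice_zero_start, PySem.List.slice_none_none]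
          rw [PySem.List.slice_from_neg_ofNat _ 40 (by omega)]
          simp [pvLastN]
        have hsp2 : PySem.Str.split₀ (m ++ " " ++ PySem.Str.strip part) =
            PySem.Str.split₀ m ++ PySem.Str.split₀ (PySem.Str.strip part) := by
          apply pv_mapToList_inj
          rw [List.map_append, pv_split₀_toList, pv_split₀_toList, pv_split₀_toList, pv_concat_toList]
          exact pv_split₀_append_space _ _
        have htailEq : pvLastN ((PySem.Str.split₀ (m ++ " " ++ PySem.Str.strip part)).map PySem.Str.lower) =
            pvLastN (tl ++ List.map PySem.Str.lower (PySem.Str.split₀ (PySem.Str.strip part))) := by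
          rw [hsp2, List.map_append, htl, pv_lastN_append]
        refine ⟨by simp [ea, eb], ?_⟩
        rw [ea, eb]
        exact ⟨hcat, by simp [htailEq]⟩
      · -- an overlap of kv ≥ 5 words is dropped from the front of the chunk
        obtain ⟨hk4, hkle⟩ := PySem.List.mem_pyRange_neg_one.mp hkmem
        have hsl : PySem.List.slice (PySem.Str.split₀ (PySem.Str.strip part)) (some kv) none =
            (PySem.Str.split₀ (PySem.Str.strip part)).drop kv.toNat :=
          PySem.List.slice_from _ (by omega)
        by_cases hrest : (PySem.Str.split₀ (PySem.Str.strip part)).drop kv.toNat = []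
        · -- everything overlapped: nothing to append on either side
          have hjempty : PySem.Str.join " " ((PySem.Str.split₀ (PySem.Str.strip part)).drop kv.toNat) = "" := by
            rw [hrest]
            rfl
          have ea : pvLoopA m part = m := by
            simp only [pvLoopA, pvRemoveOverlapRep]
            rw [if_neg (not_or.mpr ⟨hprevne, hw⟩), hkv]
            rw [if_pos (by omega : kv > 0), hsl, hjempty]
            rw [show PySem.Str.strip "" = "" from rfl]
            simp
          have eb : pvLoopB (m, tl) part = (m, tl) := by
            simp only [pvLoopB]
            rw [hkeq]
            rw [if_pos (by omega : kv ≠ 0), hsl, hjempty]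
            simp
          refine ⟨by simp [ea, eb], ?_⟩
          rw [ea, eb]
          exact ⟨hm, by simp [htl]⟩
        · -- part of the chunk survives: it is appended after the overlap is dropped
          have hwprops : ∀ w ∈ (PySem.Str.split₀ (PySem.Str.strip part)).map String.toList,
              w ≠ [] ∧ ∀ c ∈ w, PySem.Chars.isspace c = false := by
            rw [pv_split₀_toList]
            exact pv_split₀_words _
          have hrprops : ∀ w ∈ ((PySem.Str.split₀ (PySem.Str.strip part)).drop kv.toNat).map String.toList,
              w ≠ [] ∧ ∀ c ∈ w, PySem.Chars.isspace c = false := by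
            intro w hw2
            apply hwprops
            rw [List.map_drop] at hw2
            exact (List.drop_suffix _ _).mem hw2
          have hmapne : ((PySem.Str.split₀ (PySem.Str.strip part)).drop kv.toNat).map String.toList ≠ [] :=
            fun hc => hrest (List.map_eq_nil_iff.mp hc)
          have hjtl : (PySem.Str.join " " ((PySem.Str.split₀ (PySem.Str.strip part)).drop kv.toNat)).toList =
              List.intercalate [' '] (((PySem.Str.split₀ (PySem.Str.strip part)).drop kv.toNat).map String.toList) :=
            pv_join_toList _
          have hjfix : PySem.Chars.strip (PySem.Str.join " " ((PySem.Str.split₀ (PySem.Str.strip part)).drop kv.toNat)).toList = (PySem.Str.join " " ((PySem.Str.split₀ (PySem.Str.strip part)).drop kv.toNat)).toList := by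
            rw [hjtl]
            exact pv_strip_join _ hmapne hrprops
          have hcleanfix : PySem.Str.strip (PySem.Str.join " " ((PySem.Str.split₀ (PySem.Str.strip part)).drop kv.toNat)) = PySem.Str.join " " ((PySem.Str.split₀ (PySem.Str.strip part)).drop kv.toNat) :=
            pv_strip_str_fix _ hjfix
          have hcleanne : (PySem.Str.join " " ((PySem.Str.split₀ (PySem.Str.strip part)).drop kv.toNat)) ≠ "" := by
            intro hc
            apply pv_join_ne_nil _ hmapne hrprops
            rw [← hjtl, hc]
            rfl
          have hcat2 : PySem.Str.strip (m ++ " " ++ PySem.Str.join " " ((PySem.Str.split₀ (PySem.Str.strip part)).drop kv.toNat)) = m ++ " " ++ PySem.Str.join " " ((PySem.Str.split₀ (PySem.Str.strip part)).drop kv.toNat) := by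
            apply pv_toList_inj
            rw [pv_sp_toList, pv_concat_toList]
            exact pv_strip_concat _ _ hmfix hmtl hjfix
              (fun hc => hcleanne ((pv_empty_toList_iff _).mpr hc))
          have ea : pvLoopA m part = m ++ " " ++ PySem.Str.join " " ((PySem.Str.split₀ (PySem.Str.strip part)).drop kv.toNat) := by
            simp only [pvLoopA, pvRemoveOverlapRep]
            rw [if_neg (not_or.mpr ⟨hprevne, hw⟩), hkv]
            rw [if_pos (by omega : kv > 0), hsl, hcleanfix]
            rw [if_pos hcleanne]
            exact hcat2
          have eb : pvLoopB (m, tl) part = (m ++ " " ++ PySem.Str.join " " ((PySem.Str.split₀ (PySem.Str.strip part)).drop kv.toNat),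
              pvLastN (tl ++ (List.map PySem.Str.lower (PySem.Str.split₀ (PySem.Str.strip part))).drop kv.toNat)) := by
            simp only [pvLoopB]
            rw [hkeq]
            rw [if_pos (by omega : kv ≠ 0), hsl]
            rw [if_pos hcleanne, if_neg hm0]
            rw [PySem.List.slice_from (List.map PySem.Str.lower (PySem.Str.split₀ (PySem.Str.strip part))) (by omega : (0:Int) ≤ kv)]
            rw [PySem.List.slice_from_neg_ofNat _ 40 (by omega)]
            simp [pvLastN]
          have hsp3 : PySem.Str.split₀ (m ++ " " ++ PySem.Str.join " " ((PySem.Str.split₀ (PySem.Str.strip part)).drop kv.toNat)) =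
              PySem.Str.split₀ m ++ (PySem.Str.split₀ (PySem.Str.strip part)).drop kv.toNat := by
            apply pv_mapToList_inj
            rw [List.map_append, pv_split₀_toList, pv_split₀_toList, pv_concat_toList,
              pv_split₀_append_space, hjtl]
            rw [pv_split₀_join _ hrprops]
          have htailEq2 : pvLastN ((PySem.Str.split₀ (m ++ " " ++ PySem.Str.join " " ((PySem.Str.split₀ (PySem.Str.strip part)).drop kv.toNat))).map PySem.Str.lower) =
              pvLastN (tl ++ (List.map PySem.Str.lower (PySem.Str.split₀ (PySem.Str.strip part))).drop kv.toNat) := by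
            rw [hsp3, List.map_append, List.map_drop, htl, pv_lastN_append]
          refine ⟨by simp [ea, eb], ?_⟩
          rw [ea, eb]
          exact ⟨hcat2, by simp [htailEq2]⟩

theorem pv_fold (rest : List String) : ∀ (m : String) (tl : List String), pvInv m tl →
    rest.foldl pvLoopA m = (rest.foldl pvLoopB (m, tl)).1 := by
  induction rest with
  | nil => intro m tl _; rfl
  | cons p r ih =>
    intro m tl h
    obtain ⟨he, hinv⟩ := pv_step m tl p h
    simp only [List.foldl_cons]
    have hsplit : pvLoopB (m, tl) p = (pvLoopA m p, (pvLoopB (m, tl) p).2) := by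
      rw [he]
    rw [hsplit]
    exact ih (pvLoopA m p) (pvLoopB (m, tl) p).2 hinv

-- ===== VERDICT (by name: the statement is the Claim_ definition above) =====
theorem merge_translated_chunks_py_spec : Claim_equal_merge_translated_chunks_py := by
  unfold Claim_equal_merge_translated_chunks_py
  intro parts _
  unfold Spec_merge_translated_chunks_py
  match parts with
  | [] => rfl
  | p0 :: rest =>
    simp only [merge_translated_chunks_py, merge_translated_chunks_py_alt]
    rw [pv_slice40]
    exact pv_fold rest (PySem.Str.strip p0)
      (pvLastN ((PySem.Str.split₀ (PySem.Str.strip p0)).map PySem.Str.lower))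
      ⟨pv_str_strip_idem p0, rfl⟩
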